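-- pv_equiv track=rewrite | github.com/OliverHellwig/sanskrit | papers/2022-lt4hala-syntax/python/build_data.py | splitJointmorph
-- ===== SOURCE A (Python) =====
-- def splitJointmorph(jointMorph):
--     cas = '_'
--     num = '_'
--     gen = '_'
--     verbform = '_'
--     tense = '_'
--     if jointMorph!='_':
--         t5 = jointMorph.strip()
--         ms = t5.split('|')
--         for m in ms:
--             if m.startswith('Case='):
--                 cas = m[5:]
--             elif m.startswith('Number='):
--                 num = m[7:]
--             elif m.startswith('Gender='):
--                 gen = m[7:]
--             elif m.startswith('VerbForm='):
--                 verbform = m[9:]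
--             elif m.startswith('Tense='):
--                 tense = m[6:]
--         if cas=='_':
--             if 'Mood' in t5:
--                 cas = 'FV'
--             elif 'VerbForm' in t5:
--                 cas = 'IV'
--             else:
--                 cas = 'ind'
--     return cas,num,gen,verbform,tense
-- ===== SOURCE B (Python) =====
-- def splitJointmorph(jointMorph):
--     cas = num = gen = verbform = tense = '_'
--     if jointMorph != '_':
--         t5 = jointMorph.strip()
--         feat = {}
--         for m in t5.split('|'):
--             k, sep, v = m.partition('=')
--             if sep == '=':
--                 feat[k] = v
--         cas = feat.get('Case', '_')
--         num = feat.get('Number', '_')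
--         gen = feat.get('Gender', '_')
--         verbform = feat.get('VerbForm', '_')
--         tense = feat.get('Tense', '_')
--         if cas == '_':
--             cas = 'FV' if 'Mood' in t5 else ('IV' if 'VerbForm' in t5 else 'ind')
--     return cas, num, gen, verbform, tense
-- ===== Notes on version B (the rewrite author's own statement) =====
-- stated objective: idiomatic
-- what changed: B replaces A's five-way startswith/slice if-else chain by building one feature dict in a single pass (str.partition per '|'-part, last occurrence wins) and reading the five fields with dict.get defaults, keeping A's strip and Case-fallback guards.
import Mathlib
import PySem

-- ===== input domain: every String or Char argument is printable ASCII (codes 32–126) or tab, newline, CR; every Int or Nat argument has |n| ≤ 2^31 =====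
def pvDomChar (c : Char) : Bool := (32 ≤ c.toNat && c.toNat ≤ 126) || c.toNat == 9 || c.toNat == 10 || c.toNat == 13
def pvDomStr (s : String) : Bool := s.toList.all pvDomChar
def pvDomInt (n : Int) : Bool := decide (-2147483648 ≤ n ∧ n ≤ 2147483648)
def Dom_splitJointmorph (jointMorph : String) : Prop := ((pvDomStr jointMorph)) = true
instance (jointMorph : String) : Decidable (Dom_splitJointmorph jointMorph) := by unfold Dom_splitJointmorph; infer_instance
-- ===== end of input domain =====

-- B replaces A's five-way startswith if-chain by one dict built with str.partition plus five .get lookups (idiomatic; same cost).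

-- ===== PORT A =====
-- the body of A's for-loop (the five-branch startswith chain), as the fold step
def pvStepA (st : String × String × String × String × String) (m : String) :
    String × String × String × String × String :=
  let (cas, num, gen, verbform, tense) := st
  if PySem.Str.startswith m "Case=" then (PySem.Str.slice m (some 5) none, num, gen, verbform, tense)
  else if PySem.Str.startswith m "Number=" then (cas, PySem.Str.slice m (some 7) none, gen, verbform, tense)
  else if PySem.Str.startswith m "Gender=" then (cas, num, PySem.Str.slice m (some 7) none, verbform, tense)
  else if PySem.Str.startswith m "VerbForm=" then (cas, num, gen, PySem.Str.slice m (some 9) none, tense)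
  else if PySem.Str.startswith m "Tense=" then (cas, num, gen, verbform, PySem.Str.slice m (some 6) none)
  else (cas, num, gen, verbform, tense)

def splitJointmorph (jointMorph : String) : String × String × String × String × String :=
  if jointMorph ≠ "_" then
    let t5 := PySem.Str.strip jointMorph
    let ms := (PySem.Str.split? t5 "|").getD []   -- sep "|" ≠ "" so split? is always some
    let st := ms.foldl pvStepA ("_", "_", "_", "_", "_")
    let (cas, num, gen, verbform, tense) := st
    let cas :=
      if cas = "_" then
        if PySem.Str.isIn "Mood" t5 then "FV"
        else if PySem.Str.isIn "VerbForm" t5 then "IV"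
        else "ind"
      else cas
    (cas, num, gen, verbform, tense)
  else ("_", "_", "_", "_", "_")

-- ===== PORT B =====
-- exact hand port of Python's m.partition('=') for the single-char separator '=':
-- some (k, v) with m = k ++ '=' :: v at the FIRST '='; none when '=' does not occur (Python's ('', '') tail).
def pvPartitionEq : List Char → Option (List Char × List Char)
  | [] => none
  | c :: rest =>
    if c = '=' then some ([], rest)
    else match pvPartitionEq rest with
      | none => none
      | some (k, v) => some (c :: k, v)

-- the body of B's for-loop: partition the part and record it in the dict when '=' was found
def pvStepB (d : PySem.Dict String String) (m : String) : PySem.Dict String String :=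
  match pvPartitionEq m.toList with
  | some (k, v) => d.insert (String.ofList k) (String.ofList v)
  | none => d

def splitJointmorph_alt (jointMorph : String) : String × String × String × String × String :=
  if jointMorph ≠ "_" then
    let t5 := PySem.Str.strip jointMorph
    let ms := (PySem.Str.split? t5 "|").getD []   -- sep "|" ≠ "" so split? is always some
    let feat := ms.foldl pvStepB PySem.Dict.empty
    let cas := feat.getD "Case" "_"
    let num := feat.getD "Number" "_"
    let gen := feat.getD "Gender" "_"
    let verbform := feat.getD "VerbForm" "_"
    let tense := feat.getD "Tense" "_"
    let cas :=
      if cas = "_" then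
        if PySem.Str.isIn "Mood" t5 then "FV"
        else if PySem.Str.isIn "VerbForm" t5 then "IV"
        else "ind"
      else cas
    (cas, num, gen, verbform, tense)
  else ("_", "_", "_", "_", "_")

-- ===== PRECONDITION & SPEC =====
def Spec_splitJointmorph (jointMorph : String) (out : String × String × String × String × String) : Prop := out = splitJointmorph_alt jointMorph
instance (jointMorph : String) (out : String × String × String × String × String) : Decidable (Spec_splitJointmorph jointMorph out) := by unfold Spec_splitJointmorph; infer_instance

-- ===== CLAIM (what is proved, stated in full; the proofs are below) =====
def Claim_equal_splitJointmorph : Prop := ∀ (jointMorph : String), Dom_splitJointmorph jointMorph → Spec_splitJointmorph jointMorph (splitJointmorph jointMorph)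

-- ===== LEMMAS AND PROOFS =====

-- pvPartitionEq is sound: a some-result decomposes m at its first '='
theorem pvPartitionEq_some {m k v : List Char} (h : pvPartitionEq m = some (k, v)) :
    m = k ++ '=' :: v ∧ '=' ∉ k := by
  induction m generalizing k v with
  | nil => simp [pvPartitionEq] at h
  | cons c rest ih =>
    by_cases hc : c = '='
    · simp [pvPartitionEq, hc] at h
      obtain ⟨hk, hv⟩ := h
      subst hk hv
      simp [hc]
    · simp only [pvPartitionEq, if_neg hc] at h
      cases hr : pvPartitionEq rest with
      | none => simp [hr] at h
      | some kv =>
        obtain ⟨k', v'⟩ := kv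
        simp [hr] at h
        obtain ⟨hk, hv⟩ := h
        obtain ⟨he, hne⟩ := ih hr
        subst hk hv
        refine ⟨by simp [he], ?_⟩
        simp only [List.mem_cons, not_or]
        exact ⟨fun h' => hc h'.symm, hne⟩

-- pvPartitionEq finds the '=' after any '='-free prefix
theorem pvPartitionEq_append {a : List Char} (u : List Char) (h : '=' ∉ a) :
    pvPartitionEq (a ++ '=' :: u) = some (a, u) := by
  induction a with
  | nil => simp [pvPartitionEq]
  | cons c rest ih =>
    simp only [List.mem_cons, not_or] at h
    have hc : ¬ c = '=' := fun h' => h.1 h'.symm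
    simp [pvPartitionEq, hc, ih h.2]

-- a none-result means '=' does not occur in m
theorem pvPartitionEq_none {m : List Char} (h : pvPartitionEq m = none) : '=' ∉ m := by
  induction m with
  | nil => simp
  | cons c rest ih =>
    by_cases hc : c = '='
    · simp [pvPartitionEq, hc] at h
    · simp only [pvPartitionEq, if_neg hc] at h
      cases hr : pvPartitionEq rest with
      | none =>
        simp only [List.mem_cons, not_or]
        exact ⟨fun h' => hc h'.symm, ih hr⟩
      | some kv => obtain ⟨k', v'⟩ := kv; simp [hr] at h

-- A's startswith (key ++ "=") test, characterised through pvPartitionEq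
theorem pvStarts_iff {m k v key : List Char} (hm : pvPartitionEq m = some (k, v)) (hkey : '=' ∉ key) :
    (PySem.Chars.startswith m (key ++ ['=']) = true ↔ k = key) := by
  obtain ⟨he, hk⟩ := pvPartitionEq_some hm
  rw [PySem.Chars.startswith_iff]
  constructor
  · rintro ⟨t, ht⟩
    rw [he] at ht
    have : pvPartitionEq (key ++ '=' :: t) = some (key, t) := pvPartitionEq_append t hkey
    have ht' : key ++ '=' :: t = m := by rw [he, ← ht]; simp
    rw [ht', hm] at this
    simp only [Option.some.injEq, Prod.mk.injEq] at this
    exact this.1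
  · intro hkk
    subst hkk
    exact ⟨v, by simp [he]⟩

-- the loop invariant: A's five accumulators are exactly the five lookups in B's dict
set_option maxHeartbeats 1000000 in
theorem pvLoop (ms : List String) (d : PySem.Dict String String) :
    ms.foldl pvStepA (d.getD "Case" "_", d.getD "Number" "_", d.getD "Gender" "_",
      d.getD "VerbForm" "_", d.getD "Tense" "_") =
    ((ms.foldl pvStepB d).getD "Case" "_", (ms.foldl pvStepB d).getD "Number" "_",
      (ms.foldl pvStepB d).getD "Gender" "_", (ms.foldl pvStepB d).getD "VerbForm" "_",
      (ms.foldl pvStepB d).getD "Tense" "_") := by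
  induction ms generalizing d with
  | nil => rfl
  | cons m rest ih =>
    simp only [List.foldl_cons]
    have hstep : pvStepA (d.getD "Case" "_", d.getD "Number" "_", d.getD "Gender" "_",
        d.getD "VerbForm" "_", d.getD "Tense" "_") m =
        ((pvStepB d m).getD "Case" "_", (pvStepB d m).getD "Number" "_",
         (pvStepB d m).getD "Gender" "_", (pvStepB d m).getD "VerbForm" "_",
         (pvStepB d m).getD "Tense" "_") := by
      cases hp : pvPartitionEq m.toList with
      | none =>
        have hne : '=' ∉ m.toList := pvPartitionEq_none hp
        have hsw : ∀ p : String, '=' ∈ p.toList → PySem.Str.startswith m p = false := by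
          intro p hmem
          rw [PySem.Str.startswith_eq]
          cases hb : PySem.Chars.startswith m.toList p.toList with
          | false => rfl
          | true =>
            rw [PySem.Chars.startswith_iff] at hb
            obtain ⟨t, ht⟩ := hb
            exact absurd (by rw [← ht]; simp [hmem]) hne
        have c1 := hsw "Case=" (by decide)
        have c2 := hsw "Number=" (by decide)
        have c3 := hsw "Gender=" (by decide)
        have c4 := hsw "VerbForm=" (by decide)
        have c5 := hsw "Tense=" (by decide)
        simp at c1 c2 c3 c4 c5
        simp [pvStepA, pvStepB, hp, c1, c2, c3, c4, c5]
      | some kv =>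
        obtain ⟨k, v⟩ := kv
        obtain ⟨he, hkne⟩ := pvPartitionEq_some hp
        have hiff : ∀ p key : String, p.toList = key.toList ++ ['='] → '=' ∉ key.toList →
            PySem.Str.startswith m p = decide (k = key.toList) := by
          intro p key hpk hkey
          rw [PySem.Str.startswith_eq, hpk]
          rcases Bool.dichotomy (PySem.Chars.startswith m.toList (key.toList ++ ['='])) with hb | hb <;>
            rw [hb]
          · symm; simp only [decide_eq_false_iff_not]
            intro hkk
            exact absurd ((pvStarts_iff hp hkey).mpr hkk) (by simp [hb])
          · symm; simp only [decide_eq_true_eq]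
            exact (pvStarts_iff hp hkey).mp hb
        have c1 := hiff "Case=" "Case" rfl (by decide)
        have c2 := hiff "Number=" "Number" rfl (by decide)
        have c3 := hiff "Gender=" "Gender" rfl (by decide)
        have c4 := hiff "VerbForm=" "VerbForm" rfl (by decide)
        have c5 := hiff "Tense=" "Tense" rfl (by decide)
        simp at c1 c2 c3 c4 c5
        have hslice : ∀ (key : String) (n : Int), k = key.toList →
            PySem.Chars.slice m.toList (some n) none = v →
            PySem.Str.slice m (some n) none = String.ofList v := by
          intro key n _ hd
          apply String.toList_injective
          rw [PySem.Str.toList_slice, String.toList_ofList, hd]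
        -- B's inserted key as a string literal, per case
        by_cases h1 : k = ("Case" : String).toList
        · have hv := hslice "Case" 5 h1 (by rw [he, h1]; simp [pysem])
          simp [pvStepA, pvStepB, hp, c1, h1, hv,
            PySem.Dict.getD_insert, show (("Number" : String) ≠ "Case") from by decide,
            show (("Gender" : String) ≠ "Case") from by decide,
            show (("VerbForm" : String) ≠ "Case") from by decide,
            show (("Tense" : String) ≠ "Case") from by decide]
        · by_cases h2 : k = ("Number" : String).toList
          · have hv := hslice "Number" 7 h2 (by rw [he, h2]; simp [pysem])
            simp [pvStepA, pvStepB, hp, c1, c2, h2, hv,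
              PySem.Dict.getD_insert,
              show (("Case" : String) ≠ "Number") from by decide,
              show (("Gender" : String) ≠ "Number") from by decide,
              show (("VerbForm" : String) ≠ "Number") from by decide,
              show (("Tense" : String) ≠ "Number") from by decide]
          · by_cases h3 : k = ("Gender" : String).toList
            · have hv := hslice "Gender" 7 h3 (by rw [he, h3]; simp [pysem])
  
              simp [pvStepA, pvStepB, hp, c1, c2, c3, h3, hv,
                PySem.Dict.getD_insert,
                show (("Case" : String) ≠ "Gender") from by decide,
                show (("Number" : String) ≠ "Gender") from by decide,
                show (("VerbForm" : String) ≠ "Gender") from by decide,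
                show (("Tense" : String) ≠ "Gender") from by decide]
            · by_cases h4 : k = ("VerbForm" : String).toList
              · have hv := hslice "VerbForm" 9 h4 (by rw [he, h4]; simp [pysem])
    
                simp [pvStepA, pvStepB, hp, c1, c2, c3, c4, h4, hv,
                  PySem.Dict.getD_insert,
                  show (("Case" : String) ≠ "VerbForm") from by decide,
                  show (("Number" : String) ≠ "VerbForm") from by decide,
                  show (("Gender" : String) ≠ "VerbForm") from by decide,
                  show (("Tense" : String) ≠ "VerbForm") from by decide]
              · by_cases h5 : k = ("Tense" : String).toList
                · have hv := hslice "Tense" 6 h5 (by rw [he, h5]; simp [pysem])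
      
                  simp [pvStepA, pvStepB, hp, c1, c2, c3, c4, c5, h5, hv,
                    PySem.Dict.getD_insert,
                    show (("Case" : String) ≠ "Tense") from by decide,
                    show (("Number" : String) ≠ "Tense") from by decide,
                    show (("Gender" : String) ≠ "Tense") from by decide,
                    show (("VerbForm" : String) ≠ "Tense") from by decide]
                · have g : ∀ s : String, k ≠ s.toList → s ≠ String.ofList k :=
                    fun s hs h => hs (by rw [h, String.toList_ofList])
                  have h1' : k ≠ ['C','a','s','e'] := h1
                  have h2' : k ≠ ['N','u','m','b','e','r'] := h2
                  have h3' : k ≠ ['G','e','n','d','e','r'] := h3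
                  have h4' : k ≠ ['V','e','r','b','F','o','r','m'] := h4
                  have h5' : k ≠ ['T','e','n','s','e'] := h5
                  simp [pvStepA, pvStepB, hp, c1, c2, c3, c4, c5, h1', h2', h3', h4', h5',
                    PySem.Dict.getD_insert, g _ h1, g _ h2, g _ h3, g _ h4, g _ h5]
    rw [hstep, ih]

-- ===== VERDICT (by name: the statement is the Claim_ definition above) =====
theorem splitJointmorph_spec : Claim_equal_splitJointmorph := by
  intro jointMorph _
  unfold Spec_splitJointmorph splitJointmorph splitJointmorph_alt
  by_cases hj : jointMorph = "_"
  · simp [hj]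
  · simp only [ne_eq, hj, not_false_eq_true, if_pos]
    have h := pvLoop ((PySem.Str.split? (PySem.Str.strip jointMorph) "|").getD []) PySem.Dict.empty
    simp only [PySem.Dict.getD_empty] at h
    rw [h]
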